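-- pv_equiv track=rewrite | github.com/Ander456/py_program | day70.py | Pythagorean2
-- ===== SOURCE A (Python) =====
-- def Pythagorean2(nums):
--     nb = set()
--     n = len(nums)
--     for i in range(n):
--         nb.add(nums[i]**2)
--     for i in range(n):
--         for j in range(i):
--             if nums[i]**2 + nums[j]**2 in nb:
--                 return True
--     return False
-- ===== SOURCE B (Python) =====
-- def Pythagorean2(nums):
--     sq = sorted(v * v for v in nums)
--     for c in nums:
--         t = c * c
--         l, r = 0, len(sq) - 1
--         while l < r:
--             s = sq[l] + sq[r]
--             if s == t:
--                 return True
--             if s < t: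
--                 l += 1
--             else:
--                 r -= 1
--     return False
-- ===== Notes on version B (the rewrite author's own statement) =====
-- stated objective: alternative
-- what changed: A hashes all squares into a set and scans every index pair testing set membership of the pair's sum; B instead sorts the squares once and, for each candidate target c*c, runs a two-pointer sweep over the sorted array, so no hash set and no pairwise index scan exist in B.
import Mathlib
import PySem

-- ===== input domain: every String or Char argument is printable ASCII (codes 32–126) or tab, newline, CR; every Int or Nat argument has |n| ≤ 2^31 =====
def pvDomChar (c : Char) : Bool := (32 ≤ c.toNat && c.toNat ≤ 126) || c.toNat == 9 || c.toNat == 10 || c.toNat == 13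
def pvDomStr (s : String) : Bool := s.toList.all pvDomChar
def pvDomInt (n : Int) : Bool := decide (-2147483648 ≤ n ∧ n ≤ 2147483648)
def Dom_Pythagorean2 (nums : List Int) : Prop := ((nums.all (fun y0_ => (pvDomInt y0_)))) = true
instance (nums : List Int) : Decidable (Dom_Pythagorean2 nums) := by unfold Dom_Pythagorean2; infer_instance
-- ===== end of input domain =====

-- B replaces A's square-set plus pairwise index scan by a sort of the squares and, per candidate
-- target c*c, a two-pointer sweep over the sorted array. Objective: alternative algorithm.

-- ===== PORT A =====
def Pythagorean2 (nums : List Int) : Bool :=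
  let n : Int := PySem.List.len nums
  let nb : PySem.Set Int :=
    (PySem.List.pyRange 0 n).foldl
      (fun s i => PySem.Set.add s ((PySem.List.pyGetD nums i 0) ^ 2)) PySem.Set.empty
  (PySem.List.pyRange 0 n).any (fun i =>
    (PySem.List.pyRange 0 i).any (fun j =>
      PySem.Set.contains nb
        ((PySem.List.pyGetD nums i 0) ^ 2 + (PySem.List.pyGetD nums j 0) ^ 2)))

-- ===== PORT B =====
-- Source B's while loop, recursion on r-l; indices stay in [0, len), so Nat getD is exact here
-- (Python's r = len-1 = -1 on the empty list never enters the loop, matching Nat's 0-1 = 0).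
def twoPtr (sq : List Int) (t : Int) (l r : Nat) : Bool :=
  if h : l < r then
    let s := sq.getD l 0 + sq.getD r 0
    if s = t then true
    else if s < t then twoPtr sq t (l + 1) r
    else twoPtr sq t l (r - 1)
  else false
termination_by r - l
decreasing_by all_goals omega

def Pythagorean2_alt (nums : List Int) : Bool :=
  let sq : List Int := PySem.List.sorted (nums.map (fun v => v * v)) (fun x => x) false
  nums.any (fun c => twoPtr sq (c * c) 0 (sq.length - 1))

-- ===== PRECONDITION & SPEC =====
def Spec_Pythagorean2 (nums : List Int) (out : Bool) : Prop := out = Pythagorean2_alt nums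
instance (nums : List Int) (out : Bool) : Decidable (Spec_Pythagorean2 nums out) := by unfold Spec_Pythagorean2; infer_instance

-- ===== CLAIM (what is proved, stated in full; the proofs are below) =====
def Claim_equal_Pythagorean2 : Prop := ∀ (nums : List Int), Dom_Pythagorean2 nums → Spec_Pythagorean2 nums (Pythagorean2 nums)

-- ===== LEMMAS AND PROOFS =====

-- two positions i < j holding the same value force count ≥ 2
lemma count_ge_two_of_two_pos {l : List Int} {a : Int} :
    ∀ {i j : Nat}, i < j → l[i]? = some a → l[j]? = some a → 2 ≤ l.count a := by
  induction l with
  | nil => intro i j _ h _; simp at h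
  | cons x t ih =>
    intro i j hij hi hj
    cases i with
    | zero =>
      cases j with
      | zero => omega
      | succ j' =>
        simp at hi hj
        have hmem : a ∈ t := List.mem_of_getElem? hj
        have h1 : 1 ≤ t.count a := List.one_le_count_iff.mpr hmem
        subst hi
        rw [List.count_cons_self]
        omega
    | succ i' =>
      cases j with
      | zero => omega
      | succ j' =>
        simp at hi hj
        have := ih (by omega : i' < j') hi hj
        rcases eq_or_ne x a with rfl | hne
        · rw [List.count_cons_self]; omega
        · rw [List.count_cons_of_ne hne]; omega

-- count ≥ 2 yields two distinct positions holding the value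
lemma two_pos_of_count_ge_two {l : List Int} {a : Int} (h : 2 ≤ l.count a) :
    ∃ i j : Nat, i < j ∧ l[i]? = some a ∧ l[j]? = some a := by
  induction l with
  | nil => simp at h
  | cons x t ih =>
    by_cases hx : x = a
    · have h1 : 1 ≤ t.count a := by
        subst hx; rw [List.count_cons_self] at h; omega
      obtain ⟨j', hj'⟩ := List.mem_iff_getElem?.mp (List.one_le_count_iff.mp h1)
      exact ⟨0, j' + 1, by omega, by simp [hx], by simpa using hj'⟩
    · have h2 : 2 ≤ t.count a := by
        rwa [List.count_cons_of_ne hx] at h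
      obtain ⟨i, j, hij, hi, hj⟩ := ih h2
      exact ⟨i + 1, j + 1, by omega, by simpa using hi, by simpa using hj⟩

-- position-pair form ↔ value/multiplicity form (the latter is permutation-invariant)
lemma pair_char (l : List Int) (t : Int) :
    (∃ i j : Nat, j < i ∧ i < l.length ∧ l.getD i 0 + l.getD j 0 = t)
      ↔ (∃ a ∈ l, ∃ b ∈ l, (a ≠ b ∨ 2 ≤ l.count a) ∧ a + b = t) := by
  constructor
  · rintro ⟨i, j, hji, hi, hsum⟩
    have hj : j < l.length := by omega
    refine ⟨l.getD i 0, ?_, l.getD j 0, ?_, ?_, hsum⟩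
    · rw [List.getD_eq_getElem l 0 hi]; exact List.getElem_mem hi
    · rw [List.getD_eq_getElem l 0 hj]; exact List.getElem_mem hj
    · by_cases he : l.getD i 0 = l.getD j 0
      · refine Or.inr (count_ge_two_of_two_pos hji ?_ ?_)
        · rw [List.getElem?_eq_getElem hj, ← List.getD_eq_getElem l 0 hj, he]
        · rw [List.getElem?_eq_getElem hi, ← List.getD_eq_getElem l 0 hi]
      · exact Or.inl he
  · rintro ⟨a, ha, b, hb, hab, hsum⟩
    by_cases habeq : a = b
    · subst habeq
      have hcnt : 2 ≤ l.count a := by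
        rcases hab with hne | hcnt
        · exact absurd rfl hne
        · exact hcnt
      obtain ⟨i, j, hij, hi, hj⟩ := two_pos_of_count_ge_two hcnt
      have hjl : j < l.length := (List.getElem?_eq_some_iff.mp hj).1
      have hil : i < l.length := by omega
      have hva : l.getD j 0 = a := by
        rw [List.getD_eq_getElem l 0 hjl]; exact (List.getElem?_eq_some_iff.mp hj).2
      have hvb : l.getD i 0 = a := by
        rw [List.getD_eq_getElem l 0 hil]; exact (List.getElem?_eq_some_iff.mp hi).2
      exact ⟨j, i, hij, hjl, by rw [hva, hvb]; exact hsum⟩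
    · obtain ⟨i, hia⟩ := List.mem_iff_getElem?.mp ha
      obtain ⟨j, hjb⟩ := List.mem_iff_getElem?.mp hb
      have hil : i < l.length := (List.getElem?_eq_some_iff.mp hia).1
      have hjl : j < l.length := (List.getElem?_eq_some_iff.mp hjb).1
      have hva : l.getD i 0 = a := by
        rw [List.getD_eq_getElem l 0 hil]
        exact (List.getElem?_eq_some_iff.mp hia).2
      have hvb : l.getD j 0 = b := by
        rw [List.getD_eq_getElem l 0 hjl]
        exact (List.getElem?_eq_some_iff.mp hjb).2
      have hij : i ≠ j := by rintro rfl; exact habeq (hva.symm.trans hvb)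
      rcases Nat.lt_or_ge j i with hlt | hge
      · exact ⟨i, j, hlt, hil, by rw [hva, hvb]; exact hsum⟩
      · have hgt : j > i := by omega
        exact ⟨j, i, hgt, hjl, by rw [hvb, hva, Int.add_comm]; exact hsum⟩

-- monotone access into a sorted list
lemma sorted_getD_mono {sq : List Int} (hs : sq.Pairwise (· ≤ ·)) {i j : Nat}
    (hij : i ≤ j) (hj : j < sq.length) : sq.getD i 0 ≤ sq.getD j 0 := by
  rcases Nat.lt_or_ge i j with hlt | hge
  · have hi : i < sq.length := by omega
    rw [List.getD_eq_getElem _ _ hi, List.getD_eq_getElem _ _ hj]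
    exact (List.pairwise_iff_getElem.mp hs) i j hi hj hlt
  · have : i = j := by omega
    subst this; exact le_refl _

-- two-pointer correctness on a sorted list
lemma twoPtr_char {sq : List Int} (hs : sq.Pairwise (· ≤ ·)) (t : Int) :
    ∀ (n l r : Nat), r - l = n → r < sq.length →
      (twoPtr sq t l r = true ↔
        ∃ i j : Nat, l ≤ i ∧ i < j ∧ j ≤ r ∧ sq.getD i 0 + sq.getD j 0 = t) := by
  intro n
  induction n using Nat.strong_induction_on with
  | _ n ih =>
    intro l r hn hr
    rw [twoPtr]
    by_cases hlr : l < r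
    · simp only [hlr, dif_pos]
      set s := sq.getD l 0 + sq.getD r 0 with hsdef
      by_cases hst : s = t
      · simp only [hst, if_true]
        constructor
        · intro _; exact ⟨l, r, le_refl _, hlr, le_refl _, hst⟩
        · intro _; trivial
      · rw [if_neg hst]
        by_cases hlt : s < t
        · rw [if_pos hlt]
          rw [ih (r - (l + 1)) (by omega) (l + 1) r rfl hr]
          constructor
          · rintro ⟨i, j, hli, hij, hjr, hsum⟩
            exact ⟨i, j, by omega, hij, hjr, hsum⟩
          · rintro ⟨i, j, hli, hij, hjr, hsum⟩
            refine ⟨i, j, ?_, hij, hjr, hsum⟩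
            rcases Nat.lt_or_ge l i with h | h
            · omega
            · exfalso
              have hieq : i = l := by omega
              subst hieq
              have : sq.getD j 0 ≤ sq.getD r 0 := sorted_getD_mono hs hjr hr
              omega
        · rw [if_neg hlt]
          rw [ih (r - 1 - l) (by omega) l (r - 1) rfl (by omega)]
          constructor
          · rintro ⟨i, j, hli, hij, hjr, hsum⟩
            exact ⟨i, j, hli, hij, by omega, hsum⟩
          · rintro ⟨i, j, hli, hij, hjr, hsum⟩
            refine ⟨i, j, hli, hij, ?_, hsum⟩
            rcases Nat.lt_or_ge j r with h | h
            · omega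
            · exfalso
              have hjeq : j = r := by omega
              subst hjeq
              have : sq.getD l 0 ≤ sq.getD i 0 :=
                sorted_getD_mono hs hli (by omega)
              omega
    · simp only [hlr, dif_neg, not_false_iff]
      constructor
      · intro h; exact absurd h (by simp)
      · rintro ⟨i, j, hli, hij, hjr, _⟩; omega

-- characterisation of port A
lemma A_char (nums : List Int) :
    Pythagorean2 nums = true ↔
      (∃ i j : Nat, j < i ∧ i < (nums.map (fun v => v * v)).length ∧
        ((nums.map (fun v => v * v)).getD i 0 + (nums.map (fun v => v * v)).getD j 0)
          ∈ nums.map (fun v => v * v)) := by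
  have hnb : (PySem.List.pyRange 0 (PySem.List.len nums)).foldl
      (fun s i => PySem.Set.add s ((PySem.List.pyGetD nums i 0) ^ 2)) PySem.Set.empty
      = PySem.Set.ofList (nums.map (fun v => v * v)) := by
    rw [PySem.Set.ofList_eq_foldl, ← List.foldl_map]
    congr 1
    have hc : (fun i => (PySem.List.pyGetD nums i 0) ^ 2)
        = (fun x => x ^ 2) ∘ (fun j => PySem.List.pyGetD nums j 0) := rfl
    rw [hc, ← List.map_map, PySem.List.map_pyGetD_pyRange_zero nums 0]
    simp [pow_two]
  have key : ∀ k : Nat, k < nums.length →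
      (nums.map (fun v => v * v)).getD k 0 = (PySem.List.pyGetD nums (k : Int) 0) ^ 2 := by
    intro k hk
    rw [PySem.List.pyGetD_natCast, List.getD_eq_getElem _ _ (by simpa using hk),
      List.getD_eq_getElem _ _ hk, List.getElem_map]
    rw [pow_two]
  have hlen : PySem.List.len nums = (nums.length : Int) := rfl
  unfold Pythagorean2
  dsimp only
  rw [hnb]
  simp only [List.any_eq_true, PySem.List.mem_pyRange_one, PySem.Set.contains_iff,
    PySem.Set.mem_ofList, hlen]
  constructor
  · rintro ⟨i, ⟨hi0, hin⟩, j, ⟨hj0, hji⟩, hm⟩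
    refine ⟨i.toNat, j.toNat, by omega, by simp; omega, ?_⟩
    rw [key i.toNat (by omega), key j.toNat (by omega)]
    rw [Int.toNat_of_nonneg hi0, Int.toNat_of_nonneg hj0]
    exact hm
  · rintro ⟨i, j, hji, hil, hm⟩
    have hil' : i < nums.length := by simpa using hil
    refine ⟨(i : Int), ⟨by positivity, by exact_mod_cast hil'⟩,
      (j : Int), ⟨by positivity, by exact_mod_cast hji⟩, ?_⟩
    rw [← key i (by omega), ← key j (by omega)]
    exact hm

-- characterisation of port B: some square occurring in nums is a two-position sum of sorted squares
lemma B_char (nums : List Int) :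
    Pythagorean2_alt nums = true ↔
      (∃ t ∈ nums.map (fun v => v * v),
        ∃ i j : Nat, j < i ∧
          i < (PySem.List.sorted (nums.map (fun v => v * v)) (fun x => x) false).length ∧
          (PySem.List.sorted (nums.map (fun v => v * v)) (fun x => x) false).getD i 0 +
            (PySem.List.sorted (nums.map (fun v => v * v)) (fun x => x) false).getD j 0 = t) := by
  set sq := PySem.List.sorted (nums.map (fun v => v * v)) (fun x => x) false with hsq
  have hpair : sq.Pairwise (· ≤ ·) := by
    have := PySem.List.sorted_pairwise (xs := nums.map (fun v => v * v)) (key := fun x => x)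
    simpa using this
  unfold Pythagorean2_alt
  rw [← hsq]
  simp only [List.any_eq_true, List.mem_map]
  constructor
  · rintro ⟨c, hc, htp⟩
    have hlen : 0 < sq.length := by
      by_contra h
      have hz : sq.length = 0 := by omega
      rw [twoPtr] at htp
      simp [hz] at htp
    rw [twoPtr_char hpair (c * c) (sq.length - 1 - 0) 0 (sq.length - 1) rfl (by omega)] at htp
    obtain ⟨i, j, _, hij, hjr, hsum⟩ := htp
    exact ⟨c * c, ⟨c, hc, rfl⟩, j, i, hij, by omega, by rw [Int.add_comm]; exact hsum⟩
  · rintro ⟨t, ⟨c, hc, hct⟩, i, j, hji, hil, hsum⟩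
    refine ⟨c, hc, ?_⟩
    have hlen : 0 < sq.length := by omega
    rw [twoPtr_char hpair (c * c) (sq.length - 1 - 0) 0 (sq.length - 1) rfl (by omega)]
    exact ⟨j, i, by omega, hji, by omega, by rw [Int.add_comm, hct]; exact hsum⟩

-- ===== VERDICT (by name: the statement is the Claim_ definition above) =====
theorem Pythagorean2_spec : Claim_equal_Pythagorean2 := by
  intro nums _
  unfold Spec_Pythagorean2
  set sqs := nums.map (fun v => v * v) with hsqs
  set sq := PySem.List.sorted sqs (fun x => x) false with hsq
  have hperm : sq.Perm sqs := PySem.List.sorted_perm _ _ _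
  rw [← Bool.coe_iff_coe, A_char, B_char, ← hsqs, ← hsq]
  constructor
  · rintro ⟨i, j, hji, hil, hm⟩
    have hpp : ∃ i' j' : Nat, j' < i' ∧ i' < sqs.length ∧
        sqs.getD i' 0 + sqs.getD j' 0 = sqs.getD i 0 + sqs.getD j 0 :=
      ⟨i, j, hji, hil, rfl⟩
    rw [pair_char] at hpp
    obtain ⟨a, ha, b, hb, hab, hsum⟩ := hpp
    have hpp' : ∃ a ∈ sq, ∃ b ∈ sq, (a ≠ b ∨ 2 ≤ sq.count a) ∧
        a + b = sqs.getD i 0 + sqs.getD j 0 := by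
      refine ⟨a, hperm.mem_iff.mpr ha, b, hperm.mem_iff.mpr hb, ?_, hsum⟩
      rcases hab with h | h
      · exact Or.inl h
      · exact Or.inr (by rw [hperm.count_eq]; exact h)
    rw [← pair_char] at hpp'
    exact ⟨sqs.getD i 0 + sqs.getD j 0, hm, hpp'⟩
  · rintro ⟨t, htm, i, j, hji, hil, hsum⟩
    have hpp : ∃ i' j' : Nat, j' < i' ∧ i' < sq.length ∧
        sq.getD i' 0 + sq.getD j' 0 = t := ⟨i, j, hji, hil, hsum⟩
    rw [pair_char] at hpp
    obtain ⟨a, ha, b, hb, hab, hab_sum⟩ := hpp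
    have hpp' : ∃ a ∈ sqs, ∃ b ∈ sqs, (a ≠ b ∨ 2 ≤ sqs.count a) ∧ a + b = t := by
      refine ⟨a, hperm.mem_iff.mp ha, b, hperm.mem_iff.mp hb, ?_, hab_sum⟩
      rcases hab with h | h
      · exact Or.inl h
      · exact Or.inr (by rw [← hperm.count_eq]; exact h)
    rw [← pair_char] at hpp'
    obtain ⟨i', j', hji', hil', hsum'⟩ := hpp'
    exact ⟨i', j', hji', hil', by rw [hsum']; exact htm⟩
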